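-- pv_equiv track=rewrite | github.com/jhrncar/FIIT-ZS-2021-UI-3-Hrncar | main.py | get_medoid
-- ===== SOURCE A (Python) =====
-- def man_dist(p1, p2):
--     return abs(p1[0] - p2[0]) + abs(p1[1] - p2[1])
--
-- def get_medoid(cluster):
--     min = 0
--     min_index = -1
--     for p1 in range(len(cluster)):
--         dist = 0
--         for p2 in range(len(cluster)):
--             if p1 == p2:
--                 continue
--             dist += man_dist(cluster[p1], cluster[p2])
--         if min_index == -1:
--             min = dist
--             min_index = 0
--         if dist < min:
--             min_index = p1
--             min = dist
--     return cluster[min_index]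
-- ===== SOURCE B (Python) =====
-- def get_medoid(cluster):
--     n = len(cluster)
--
--     def axis_costs(vals):
--         # dict value -> sum of |value - v| over all vals, via sort + prefix/suffix sums
--         s = sorted(vals)
--         costs = {}
--         pre = 0
--         suf = sum(s)
--         for k, v in enumerate(s):
--             suf -= v
--             costs[v] = (k * v - pre) + (suf - (n - 1 - k) * v)
--             pre += v
--         return costs
--
--     cx = axis_costs([p[0] for p in cluster])
--     cy = axis_costs([p[1] for p in cluster])
--     best = None
--     best_dist = None
--     for p in cluster:
--         d = cx[p[0]] + cy[p[1]]
--         if best_dist is None or d < best_dist: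
--             best = p
--             best_dist = d
--     return best
-- ===== Notes on version B (the rewrite author's own statement) =====
-- stated objective: faster
-- what changed: Instead of summing Manhattan distances over all pairs (nested loops), B sorts each coordinate axis once and computes every point's total |diff| sum from prefix/suffix sums via a value->cost dict, then takes the first argmin in one pass.
-- outside the precondition, e.g. on get_medoid([()]): A returns (), B raises IndexError
import Mathlib
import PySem

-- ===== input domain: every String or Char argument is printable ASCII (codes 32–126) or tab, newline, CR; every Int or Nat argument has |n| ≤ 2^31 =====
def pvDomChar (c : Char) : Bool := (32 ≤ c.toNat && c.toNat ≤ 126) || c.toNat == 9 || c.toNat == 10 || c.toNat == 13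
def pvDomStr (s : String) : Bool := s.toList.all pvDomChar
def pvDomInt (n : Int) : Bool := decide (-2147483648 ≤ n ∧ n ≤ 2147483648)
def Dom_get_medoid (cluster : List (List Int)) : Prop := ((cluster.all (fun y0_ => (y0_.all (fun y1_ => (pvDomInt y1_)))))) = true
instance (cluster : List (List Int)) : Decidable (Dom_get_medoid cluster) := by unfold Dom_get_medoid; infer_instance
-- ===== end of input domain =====

-- B replaces A's O(n^2) all-pairs distance scan by per-axis sorting with prefix/suffix sums.

-- ===== PORT A =====
def man_dist (p1 p2 : List Int) : Int :=
  |PySem.List.pyGetD p1 0 0 - PySem.List.pyGetD p2 0 0| +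
  |PySem.List.pyGetD p1 1 0 - PySem.List.pyGetD p2 1 0|

def get_medoid (cluster : List (List Int)) : List Int :=
  let st := (PySem.List.pyRange 0 (PySem.List.len cluster) 1).foldl
    (fun (acc : Int × Int) p1 =>
      let dist := (PySem.List.pyRange 0 (PySem.List.len cluster) 1).foldl
        (fun d p2 =>
          if p1 == p2 then d
          else d + man_dist (PySem.List.pyGetD cluster p1 []) (PySem.List.pyGetD cluster p2 []))
        0
      let acc := if acc.2 == -1 then (dist, 0) else acc
      if dist < acc.1 then (dist, p1) else acc)
    ((0 : Int), (-1 : Int))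
  PySem.List.pyGetD cluster st.2 []

-- ===== PORT B =====
def axis_costs (n : Int) (vals : List Int) : PySem.Dict Int Int :=
  let s := PySem.List.sorted vals (fun v => v) false
  let st := (PySem.List.enumerate s 0).foldl
    (fun (acc : PySem.Dict Int Int × Int × Int) kv =>
      let suf := acc.2.2 - kv.2
      let costs := acc.1.insert kv.2 ((kv.1 * kv.2 - acc.2.1) + (suf - (n - 1 - kv.1) * kv.2))
      (costs, acc.2.1 + kv.2, suf))
    (PySem.Dict.empty, 0, s.sum)
  st.1

def get_medoid_alt (cluster : List (List Int)) : List Int :=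
  let n := PySem.List.len cluster
  let cx := axis_costs n (cluster.map (fun p => PySem.List.pyGetD p 0 0))
  let cy := axis_costs n (cluster.map (fun p => PySem.List.pyGetD p 1 0))
  let st := cluster.foldl
    (fun (acc : Option (List Int) × Option Int) p =>
      let d := cx.getD (PySem.List.pyGetD p 0 0) 0 + cy.getD (PySem.List.pyGetD p 1 0) 0
      match acc.2 with
      | none => (some p, some d)
      | some bd => if d < bd then (some p, some d) else acc)
    (none, none)
  st.1.getD []

-- ===== PRECONDITION & SPEC =====
-- Pre_ excludes the empty cluster (A raises IndexError on cluster[-1]) and clusters containing a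
-- point with fewer than two coordinates: A raises IndexError on those too, except in the degenerate
-- single-point cluster, where A returns the sole point without ever indexing it while B reads p[0].
def Pre_get_medoid (cluster : List (List Int)) : Prop :=
  cluster ≠ [] ∧ ∀ p ∈ cluster, 2 ≤ p.length
instance (cluster : List (List Int)) : Decidable (Pre_get_medoid cluster) := by
  unfold Pre_get_medoid; infer_instance

def pvWitness_get_medoid : List (List Int) := [[0, 0], [1, 2], [3, 1]]

def Spec_get_medoid (cluster : List (List Int)) (out : List Int) : Prop := out = get_medoid_alt cluster
instance (cluster : List (List Int)) (out : List Int) : Decidable (Spec_get_medoid cluster out) := by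
  unfold Spec_get_medoid; infer_instance

-- ===== CLAIM (what is proved, stated in full; the proofs are below) =====
def Claim_equal_get_medoid : Prop := ∀ (cluster : List (List Int)), Dom_get_medoid cluster → Pre_get_medoid cluster → Spec_get_medoid cluster (get_medoid cluster)

-- ===== LEMMAS AND PROOFS =====

/-- First element of `b :: l` minimizing `g` (strict improvement, so first wins ties). -/
def fmin {α : Type} (g : α → Int) (b : α) : List α → α
  | [] => b
  | x :: xs => if g x < g b then fmin g x xs else fmin g b xs

theorem fmin_mem {α : Type} (g : α → Int) (b : α) (l : List α) : fmin g b l ∈ b :: l := by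
  induction l generalizing b with
  | nil => simp [fmin]
  | cons x xs ih =>
    simp only [fmin]
    split
    · have := ih x; simp at this ⊢; tauto
    · have := ih b; simp at this ⊢; tauto

/-- The second component of `fmin` over an enumerate, with cost reading the element, is `fmin` over the plain list. -/
theorem fminP_snd {α : Type} (g : α → Int) (xs : List α) (b : α) (i0 s : Int) :
    (fmin (fun q : Int × α => g q.2) (i0, b) (PySem.List.enumerate xs s)).2 = fmin g b xs := by
  induction xs generalizing b i0 s with
  | nil => simp [PySem.List.enumerate_nil, fmin]
  | cons x xs ih =>
    rw [PySem.List.enumerate_cons]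
    simp only [fmin]
    split <;> exact ih ..

/-- A's outer loop (on index/element pairs) computes the pair-`fmin` once the state holds a real best. -/
theorem foldA_eq_fmin {α : Type} (g : α → Int) (l : List (Int × α)) (b : α) (i0 : Int)
    (h0 : 0 ≤ i0) (hl : ∀ q ∈ l, 0 ≤ q.1) :
    l.foldl (fun (acc : Int × Int) kp =>
        let dist := g kp.2
        let acc := if acc.2 == -1 then (dist, 0) else acc
        if dist < acc.1 then (dist, kp.1) else acc) (g b, i0)
      = (g (fmin (fun q : Int × α => g q.2) (i0, b) l).2,
         (fmin (fun q : Int × α => g q.2) (i0, b) l).1) := by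
  induction l generalizing b i0 with
  | nil => simp [fmin]
  | cons kp l ih =>
    have hne : (i0 == (-1 : Int)) = false := by
      simp only [beq_eq_false_iff_ne]; omega
    simp only [List.foldl_cons, hne, if_false, Bool.false_eq_true, fmin]
    split
    · exact ih kp.2 kp.1 (hl kp (by simp)) (fun q hq => hl q (by simp [hq]))
    · exact ih b i0 h0 (fun q hq => hl q (by simp [hq]))

/-- B's selection loop computes `fmin`. -/
theorem foldB_eq_fmin {α : Type} [Inhabited α] (g : α → Int) (l : List α) (b : α) :
    l.foldl (fun (acc : Option α × Option Int) p =>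
        match acc.2 with
        | none => (some p, some (g p))
        | some bd => if g p < bd then (some p, some (g p)) else acc) (some b, some (g b))
      = (some (fmin g b l), some (g (fmin g b l))) := by
  induction l generalizing b with
  | nil => simp [fmin]
  | cons x xs ih =>
    simp only [List.foldl_cons, fmin]
    split <;> exact ih _

/-- last-occurrence decomposition -/
theorem exists_last_occ {α : Type} [DecidableEq α] {x : α} {s : List α} (h : x ∈ s) :
    ∃ u w, s = u ++ x :: w ∧ x ∉ w := by
  induction s with
  | nil => cases h
  | cons y t ih =>
    by_cases hx : x ∈ t
    · obtain ⟨u, w, rfl, hw⟩ := ih hx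
      exact ⟨y :: u, w, rfl, hw⟩
    · rcases List.mem_cons.mp h with rfl | hmem
      · exact ⟨[], t, rfl, hx⟩
      · exact absurd hmem hx

/-- running prefix/suffix sums of B's cost loop -/
theorem costs_fold_sums (n : Int) (t : List Int) (d : PySem.Dict Int Int) (pre suf s0 : Int) :
    ((PySem.List.enumerate t s0).foldl
      (fun (acc : PySem.Dict Int Int × Int × Int) kv =>
        let sf := acc.2.2 - kv.2
        let costs := acc.1.insert kv.2 ((kv.1 * kv.2 - acc.2.1) + (sf - (n - 1 - kv.1) * kv.2))
        (costs, acc.2.1 + kv.2, sf)) (d, pre, suf)).2 = (pre + t.sum, suf - t.sum) := by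
  induction t generalizing d pre suf s0 with
  | nil => simp [PySem.List.enumerate_nil]
  | cons v t ih =>
    rw [PySem.List.enumerate_cons]
    simp only [List.foldl_cons]
    rw [ih]
    simp; constructor <;> ring

/-- the cost loop never touches key `x` while folding elements ≠ x -/
theorem costs_fold_getD_of_not_mem (n : Int) (t : List Int) (x : Int) (hx : x ∉ t)
    (d : PySem.Dict Int Int) (pre suf s0 : Int) :
    (((PySem.List.enumerate t s0).foldl
      (fun (acc : PySem.Dict Int Int × Int × Int) kv =>
        let sf := acc.2.2 - kv.2
        let costs := acc.1.insert kv.2 ((kv.1 * kv.2 - acc.2.1) + (sf - (n - 1 - kv.1) * kv.2))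
        (costs, acc.2.1 + kv.2, sf)) (d, pre, suf)).1).getD x 0 = d.getD x 0 := by
  induction t generalizing d pre suf s0 with
  | nil => simp [PySem.List.enumerate_nil]
  | cons v t ih =>
    rw [PySem.List.enumerate_cons]
    simp only [List.foldl_cons]
    rw [ih (fun h => hx (List.mem_cons_of_mem _ h))]
    exact PySem.Dict.getD_insert_of_ne _ _ _ (fun h => hx (h ▸ List.mem_cons_self))

theorem sum_abs_le (u : List Int) (x : Int) (hu : ∀ v ∈ u, v ≤ x) :
    (u.map (fun v => |x - v|)).sum = (u.length : Int) * x - u.sum := by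
  induction u with
  | nil => simp
  | cons v u ih =>
    have hv : |x - v| = x - v := abs_of_nonneg (by have := hu v (by simp); omega)
    simp only [List.map_cons, List.sum_cons, List.length_cons, List.sum_cons,
      ih (fun a ha => hu a (by simp [ha])), hv]
    push_cast; ring

theorem sum_abs_ge (w : List Int) (x : Int) (hw : ∀ v ∈ w, x ≤ v) :
    (w.map (fun v => |x - v|)).sum = w.sum - (w.length : Int) * x := by
  induction w with
  | nil => simp
  | cons v w ih =>
    have hv : |x - v| = v - x := by
      rw [abs_sub_comm]; exact abs_of_nonneg (by have := hw v (by simp); omega)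
    simp only [List.map_cons, List.sum_cons, List.length_cons,
      ih (fun a ha => hw a (by simp [ha])), hv]
    push_cast; ring

/-- MAIN dict lemma: `axis_costs` looks up the exact sum of absolute differences. -/
theorem axis_costs_getD (vals : List Int) (x : Int) (hx : x ∈ vals) :
    (axis_costs (vals.length : Int) vals).getD x 0 = (vals.map (fun v => |x - v|)).sum := by
  have hperm : (PySem.List.sorted vals (fun v => v) false).Perm vals :=
    PySem.List.sorted_perm vals (fun v => v) false
  have hpw : (PySem.List.sorted vals (fun v => v) false).Pairwise (· ≤ ·) :=
    PySem.List.sorted_pairwise vals (fun v => v)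
  have hsum : (vals.map (fun v => |x - v|)).sum
      = ((PySem.List.sorted vals (fun v => v) false).map (fun v => |x - v|)).sum :=
    ((hperm.map _).sum_eq).symm
  have hlen : (PySem.List.sorted vals (fun v => v) false).length = vals.length := hperm.length_eq
  rw [hsum]
  unfold axis_costs
  obtain ⟨u, w, hdec, hwx⟩ := exists_last_occ (hperm.mem_iff.mpr hx)
  rw [hdec] at hpw hlen ⊢
  simp only []
  rw [PySem.List.enumerate_append, List.foldl_append, PySem.List.enumerate_cons, List.foldl_cons]
  -- the state after the prefix u
  have hsums := costs_fold_sums (vals.length : Int) u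
    (PySem.Dict.empty) 0 ((u ++ x :: w).sum) 0
  set Au := (PySem.List.enumerate u 0).foldl
      (fun (acc : PySem.Dict Int Int × Int × Int) kv =>
        let sf := acc.2.2 - kv.2
        let costs := acc.1.insert kv.2
          ((kv.1 * kv.2 - acc.2.1) + (sf - ((vals.length : Int) - 1 - kv.1) * kv.2))
        (costs, acc.2.1 + kv.2, sf)) (PySem.Dict.empty, 0, (u ++ x :: w).sum) with hAu
  have hAu2 : Au.2 = (0 + u.sum, (u ++ x :: w).sum - u.sum) := by rw [hAu]; exact hsums
  have hA1 : Au.2.1 = 0 + u.sum := by rw [hAu2]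
  have hA2 : Au.2.2 = (u ++ x :: w).sum - u.sum := by rw [hAu2]
  simp only [hA1, hA2]
  rw [costs_fold_getD_of_not_mem _ _ _ hwx]
  rw [PySem.Dict.getD_insert_self]
  -- order facts
  rw [List.pairwise_append] at hpw
  have hu_le : ∀ v ∈ u, v ≤ x := fun v hv => hpw.2.2 v hv x (by simp)
  have hw_ge : ∀ v ∈ w, x ≤ v := fun v hv => (List.pairwise_cons.mp hpw.2.1).1 v hv
  simp only [List.map_append, List.map_cons, List.sum_append, List.sum_cons]
  rw [sum_abs_le u x hu_le, sum_abs_ge w x hw_ge]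
  have hxx : |x - x| = (0 : Int) := by simp
  rw [hxx]
  have hL : (vals.length : Int) = (u.length : Int) + 1 + (w.length : Int) := by
    rw [← hlen]; push_cast [List.length_append, List.length_cons]; ring
  rw [hL]
  ring

/-- B's point cost agrees with A's pairwise distance sum. -/
theorem point_cost_eq (cluster : List (List Int)) (p : List Int) (hp : p ∈ cluster) :
    (axis_costs (PySem.List.len cluster) (cluster.map (fun q => PySem.List.pyGetD q 0 0))).getD (PySem.List.pyGetD p 0 0) 0 +
    (axis_costs (PySem.List.len cluster) (cluster.map (fun q => PySem.List.pyGetD q 1 0))).getD (PySem.List.pyGetD p 1 0) 0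
      = (cluster.map (man_dist p)).sum := by
  have h0 : PySem.List.pyGetD p 0 0 ∈ cluster.map (fun q => PySem.List.pyGetD q 0 0) :=
    List.mem_map_of_mem hp
  have h1 : PySem.List.pyGetD p 1 0 ∈ cluster.map (fun q => PySem.List.pyGetD q 1 0) :=
    List.mem_map_of_mem hp
  have ex := axis_costs_getD (cluster.map (fun q => PySem.List.pyGetD q 0 0)) _ h0
  have ey := axis_costs_getD (cluster.map (fun q => PySem.List.pyGetD q 1 0)) _ h1
  simp only [List.length_map, List.map_map] at ex ey
  simp only [PySem.List.len_eq]
  rw [ex, ey, ← PySem.List.sum_map_add_int]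
  rfl

/-- A's inner loop computes the full (self term is 0) distance sum. -/
theorem inner_loop_eq (cluster : List (List Int)) (k : Nat) (hk : k < cluster.length) :
    (PySem.List.pyRange 0 (PySem.List.len cluster) 1).foldl
      (fun d p2 =>
        if ((k : Int)) == p2 then d
        else d + man_dist (PySem.List.pyGetD cluster (k : Int) []) (PySem.List.pyGetD cluster p2 []))
      0
    = (cluster.map (man_dist (PySem.List.pyGetD cluster (k : Int) []))).sum := by
  have hkp : PySem.List.pyGetD cluster (k : Int) [] = cluster[k] := by
    rw [PySem.List.pyGetD_natCast]; exact List.getD_eq_getElem _ _ hk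
  have hcong : ∀ (acc : Int), ∀ p2 ∈ PySem.List.pyRange 0 (PySem.List.len cluster) 1,
      (if ((k : Int)) == p2 then acc
       else acc + man_dist (PySem.List.pyGetD cluster (k : Int) []) (PySem.List.pyGetD cluster p2 []))
      = acc + man_dist (PySem.List.pyGetD cluster (k : Int) []) (PySem.List.pyGetD cluster p2 []) := by
    intro acc p2 _
    split
    · next h =>
      have h' : (k : Int) = p2 := eq_of_beq h
      rw [← h', hkp]
      simp [man_dist]
    · rfl
  rw [PySem.List.foldl_congr_mem _ _ _ _ hcong]
  simp only [PySem.List.len_eq]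
  rw [PySem.List.foldl_pyRange_zero_pyGetD' cluster []
    (fun d q => d + man_dist (PySem.List.pyGetD cluster (k : Int) []) q) 0]
  rw [PySem.List.foldl_add]
  simp

/-- A's index loop over `range(len(xs))` is a loop over `enumerate(xs)`. -/
theorem foldA_to_enumerate (xs : List (List Int)) (g : List Int → Int) (init : Int × Int) :
    (PySem.List.pyRange 0 (PySem.List.len xs) 1).foldl
      (fun (acc : Int × Int) p1 =>
        let dist := g (PySem.List.pyGetD xs p1 [])
        let acc := if acc.2 == -1 then (dist, 0) else acc
        if dist < acc.1 then (dist, p1) else acc) init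
    = (PySem.List.enumerate xs 0).foldl
      (fun (acc : Int × Int) kp =>
        let dist := g kp.2
        let acc := if acc.2 == -1 then (dist, 0) else acc
        if dist < acc.1 then (dist, kp.1) else acc) init := by
  rw [PySem.List.enumerate_eq_map_pyRange xs [], List.foldl_map]

theorem a_eq_fmin (c0 : List Int) (rest : List (List Int)) :
    get_medoid (c0 :: rest)
      = fmin (fun p => (((c0 :: rest)).map (man_dist p)).sum) c0 rest := by
  unfold get_medoid
  rw [PySem.List.foldl_congr_mem _ _
      (fun (acc : Int × Int) p1 =>
        let dist := ((c0 :: rest).map (man_dist (PySem.List.pyGetD (c0 :: rest) p1 []))).sum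
        let acc := if acc.2 == -1 then (dist, 0) else acc
        if dist < acc.1 then (dist, p1) else acc)
      _ ?hc]
  case hc =>
    intro acc p1 hp1
    rw [PySem.List.mem_pyRange_one] at hp1
    have hk : ((p1.toNat : Int)) = p1 := Int.toNat_of_nonneg hp1.1
    have hklen : p1.toNat < (c0 :: rest).length := by
      have h2 := hp1.2
      rw [PySem.List.len_eq] at h2
      omega
    rw [← hk, inner_loop_eq (c0 :: rest) p1.toNat hklen]
  rw [foldA_to_enumerate (c0 :: rest) (fun p => ((c0 :: rest).map (man_dist p)).sum)]
  set F := (fun (acc : Int × Int) kp =>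
      let dist := (fun p => ((c0 :: rest).map (man_dist p)).sum) (kp : Int × List Int).2
      let acc := if acc.2 == -1 then (dist, 0) else acc
      if dist < acc.1 then (dist, kp.1) else acc) with hF
  rw [show PySem.List.enumerate (c0 :: rest) 0 = (0, c0) :: PySem.List.enumerate rest 1 from by
    rw [PySem.List.enumerate_cons]; norm_num]
  rw [List.foldl_cons]
  have hinit : F ((0 : Int), (-1 : Int)) ((0 : Int), c0)
      = (((c0 :: rest).map (man_dist c0)).sum, (0 : Int)) := by
    rw [hF]; simp
  rw [hinit, hF]
  rw [foldA_eq_fmin (fun p => ((c0 :: rest).map (man_dist p)).sum)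
    (PySem.List.enumerate rest 1) c0 0 le_rfl ?hidx]
  case hidx =>
    intro q hq
    rw [PySem.List.mem_enumerate_iff] at hq
    obtain ⟨k, hk, rfl⟩ := hq
    simp
    omega
  set P := fmin (fun q : Int × List Int => ((c0 :: rest).map (man_dist q.2)).sum)
    ((0 : Int), c0) (PySem.List.enumerate rest 1) with hP
  have hPval : PySem.List.pyGetD (c0 :: rest) P.1 [] = P.2 := by
    have hmem := fmin_mem (fun q : Int × List Int => ((c0 :: rest).map (man_dist q.2)).sum)
      ((0 : Int), c0) (PySem.List.enumerate rest 1)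
    rw [← hP] at hmem
    rcases List.mem_cons.mp hmem with h | h
    · rw [h]; exact PySem.List.pyGetD_zero_cons ..
    · rw [PySem.List.mem_enumerate_iff] at h
      obtain ⟨k, hk, hPeq⟩ := h
      rw [hPeq]
      have hcast : (1 + (k : Int)) = (((k + 1 : Nat) : Int)) := by push_cast; ring
      simp only [hcast, PySem.List.pyGetD_natCast]
      rw [List.getD_cons_succ]
      exact List.getD_eq_getElem _ _ hk
  simp only []
  rw [hPval, hP]
  exact fminP_snd (fun p => ((c0 :: rest).map (man_dist p)).sum) rest c0 0 1

theorem b_eq_fmin (c0 : List Int) (rest : List (List Int)) :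
    get_medoid_alt (c0 :: rest)
      = fmin (fun p => (((c0 :: rest)).map (man_dist p)).sum) c0 rest := by
  simp only [get_medoid_alt]
  rw [PySem.List.foldl_congr_mem _ _
      (fun (acc : Option (List Int) × Option Int) p =>
        match acc.2 with
        | none => (some p, some (((c0 :: rest).map (man_dist p)).sum))
        | some bd =>
          if ((c0 :: rest).map (man_dist p)).sum < bd then
            (some p, some (((c0 :: rest).map (man_dist p)).sum))
          else acc)
      _ ?hc]
  case hc =>
    intro acc p hp
    rw [point_cost_eq (c0 :: rest) p hp]
  rw [List.foldl_cons]
  show (List.foldl _ (some c0, some (((c0 :: rest).map (man_dist c0)).sum)) rest).1.getD [] = _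
  rw [foldB_eq_fmin]
  rfl

-- ===== VERDICT (by name: the statement is the Claim_ definition above) =====
theorem get_medoid_spec : Claim_equal_get_medoid := by
  intro cluster _ hpre
  obtain ⟨c0, rest, rfl⟩ := List.exists_cons_of_ne_nil hpre.1
  unfold Spec_get_medoid
  rw [a_eq_fmin, b_eq_fmin]
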